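-- pv_equiv track=rewrite | github.com/huawei-noah/SMARTS | scenarios/waymo_motion/waymo_utility.py | get_object_type_count
-- ===== SOURCE A (Python) =====
-- def get_object_type_count(trajectories):
--     cars, pedestrian, cyclist, other = [], [], [], []
--     ego = None
--     for vehicle_id in trajectories:
--         if trajectories[vehicle_id][2] == 1:
--             ego = vehicle_id
--         elif trajectories[vehicle_id][3] == 1:
--             cars.append(vehicle_id)
--         elif trajectories[vehicle_id][3] == 2:
--             pedestrian.append(vehicle_id)
--         elif trajectories[vehicle_id][3] == 3:
--             cyclist.append(vehicle_id)
--         else: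
--             other.append(vehicle_id)
--     return ego, cars, pedestrian, cyclist, other
-- ===== SOURCE B (Python) =====
-- def get_object_type_count(trajectories):
--     ego_matches = [vid for vid in trajectories if trajectories[vid][2] == 1]
--     ego = ego_matches[-1] if ego_matches else None
--     non_ego = [vid for vid in trajectories if trajectories[vid][2] != 1]
--     cars = [vid for vid in non_ego if trajectories[vid][3] == 1]
--     pedestrian = [vid for vid in non_ego if trajectories[vid][3] == 2]
--     cyclist = [vid for vid in non_ego if trajectories[vid][3] == 3]
--     other = [vid for vid in non_ego if trajectories[vid][3] not in (1, 2, 3)]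
--     return ego, cars, pedestrian, cyclist, other
-- ===== Notes on version B (the rewrite author's own statement) =====
-- stated objective: alternative
-- what changed: Replaces A's single classify-each-once loop with a multi-pass decomposition: ego is computed as the last id whose trajectory has flag [2]==1, and each category is its own filtered comprehension over the non-ego ids, keyed on trajectory field [3].
import Mathlib
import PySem

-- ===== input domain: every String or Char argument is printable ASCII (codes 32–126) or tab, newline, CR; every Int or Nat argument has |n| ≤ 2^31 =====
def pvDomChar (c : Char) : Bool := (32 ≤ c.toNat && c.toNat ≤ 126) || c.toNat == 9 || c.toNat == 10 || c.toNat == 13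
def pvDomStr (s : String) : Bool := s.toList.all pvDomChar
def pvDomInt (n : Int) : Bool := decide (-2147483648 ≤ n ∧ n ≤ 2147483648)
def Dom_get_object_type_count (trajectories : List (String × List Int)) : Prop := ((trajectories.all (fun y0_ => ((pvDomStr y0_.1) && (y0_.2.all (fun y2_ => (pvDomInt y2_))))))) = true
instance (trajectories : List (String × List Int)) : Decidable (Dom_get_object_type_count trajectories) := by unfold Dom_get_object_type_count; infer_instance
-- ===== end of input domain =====

-- B replaces A's single classify-each-once loop with a multi-pass decomposition: ego = last id with flag [2]==1, then one filtered pass per category over the non-ego ids.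
-- ===== PORT A =====
-- trajectories[vehicle_id][k]: in-range list index (Pre_ guarantees it); default 0 only outside Pre_
def pvIdx (l : List Int) (i : Int) : Int := (PySem.List.pyGet? l i).getD 0

def pvStepA (acc : Option String × List String × List String × List String × List String)
    (p : String × List Int) : Option String × List String × List String × List String × List String :=
  let (ego, cars, ped, cyc, oth) := acc
  if pvIdx p.2 2 == 1 then (some p.1, cars, ped, cyc, oth)
  else if pvIdx p.2 3 == 1 then (ego, cars ++ [p.1], ped, cyc, oth)
  else if pvIdx p.2 3 == 2 then (ego, cars, ped ++ [p.1], cyc, oth)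
  else if pvIdx p.2 3 == 3 then (ego, cars, ped, cyc ++ [p.1], oth)
  else (ego, cars, ped, cyc, oth ++ [p.1])

def get_object_type_count (trajectories : List (String × List Int)) : Option String × List String × List String × List String × List String :=
  trajectories.foldl pvStepA (none, [], [], [], [])

-- ===== PORT B =====
def get_object_type_count_alt (trajectories : List (String × List Int)) : Option String × List String × List String × List String × List String :=
  let egoMatches := (trajectories.filter (fun p => pvIdx p.2 2 == 1)).map Prod.fst
  let ego := egoMatches.getLast?
  let nonEgo := trajectories.filter (fun p => !(pvIdx p.2 2 == 1))
  let cars := (nonEgo.filter (fun p => pvIdx p.2 3 == 1)).map Prod.fst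
  let pedestrian := (nonEgo.filter (fun p => pvIdx p.2 3 == 2)).map Prod.fst
  let cyclist := (nonEgo.filter (fun p => pvIdx p.2 3 == 3)).map Prod.fst
  let other := (nonEgo.filter (fun p => !(pvIdx p.2 3 == 1) && !(pvIdx p.2 3 == 2) && !(pvIdx p.2 3 == 3))).map Prod.fst
  (ego, cars, pedestrian, cyclist, other)

-- ===== PRECONDITION & SPEC =====
-- Pre_ excludes (a) inputs where Python raises IndexError: a trajectory list too short for the
-- indices the code reads (index 2 always; index 3 unless flag [2]==1); and (b) duplicate vehicle
-- ids, which cannot occur in a Python dict (the assoc list stands for a dict).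
def Pre_get_object_type_count (trajectories : List (String × List Int)) : Prop :=
  (trajectories.map Prod.fst).Nodup ∧
  ∀ p ∈ trajectories, 4 ≤ p.2.length ∨ PySem.List.pyGet? p.2 2 = some 1
instance (trajectories : List (String × List Int)) : Decidable (Pre_get_object_type_count trajectories) := by unfold Pre_get_object_type_count; infer_instance
def pvWitness_get_object_type_count : (List (String × List Int)) :=
  [("car1", [0, 0, 0, 1]), ("ego", [0, 0, 1]), ("walker", [0, 0, 0, 2]), ("ufo", [0, 0, 0, 9])]
def Spec_get_object_type_count (trajectories : List (String × List Int)) (out : Option String × List String × List String × List String × List String) : Prop := out = get_object_type_count_alt trajectories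
instance (trajectories : List (String × List Int)) (out : Option String × List String × List String × List String × List String) : Decidable (Spec_get_object_type_count trajectories out) := by unfold Spec_get_object_type_count; infer_instance

-- ===== CLAIM (what is proved, stated in full; the proofs are below) =====
def Claim_equal_get_object_type_count : Prop := ∀ (trajectories : List (String × List Int)), Dom_get_object_type_count trajectories → Pre_get_object_type_count trajectories → Spec_get_object_type_count trajectories (get_object_type_count trajectories)

-- ===== LEMMAS AND PROOFS =====

lemma getLast?_cons_or {α : Type} (l : List α) (a : α) (e : Option α) :
    ((a :: l).getLast?).or e = l.getLast?.or (some a) := by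
  cases h : l.getLast? <;> simp [List.getLast?_cons, h]

-- A's fold, started from an arbitrary accumulator, in terms of B's filtered passes.
lemma foldA_eq (ts : List (String × List Int)) (e : Option String) (c p cy o : List String) :
    ts.foldl pvStepA (e, c, p, cy, o) =
      ((((ts.filter (fun q => pvIdx q.2 2 == 1)).map Prod.fst).getLast?).or e,
       c ++ ((ts.filter (fun q => !(pvIdx q.2 2 == 1))).filter (fun q => pvIdx q.2 3 == 1)).map Prod.fst,
       p ++ ((ts.filter (fun q => !(pvIdx q.2 2 == 1))).filter (fun q => pvIdx q.2 3 == 2)).map Prod.fst,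
       cy ++ ((ts.filter (fun q => !(pvIdx q.2 2 == 1))).filter (fun q => pvIdx q.2 3 == 3)).map Prod.fst,
       o ++ ((ts.filter (fun q => !(pvIdx q.2 2 == 1))).filter
              (fun q => !(pvIdx q.2 3 == 1) && !(pvIdx q.2 3 == 2) && !(pvIdx q.2 3 == 3))).map Prod.fst) := by
  induction ts generalizing e c p cy o with
  | nil => simp
  | cons hd tl ih =>
    simp only [List.foldl_cons, pvStepA]
    by_cases h2 : pvIdx hd.2 2 == 1
    · have e2 : pvIdx hd.2 2 = 1 := by simpa using h2
      rw [ih]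
      simp only [List.filter_cons, e2, beq_self_eq_true, Bool.not_true, Bool.false_eq_true,
        if_true, if_false, List.map_cons, getLast?_cons_or]
    · by_cases h31 : pvIdx hd.2 3 == 1
      · have e3 : pvIdx hd.2 3 = 1 := by simpa using h31
        simp [h2, e3, ih]
      · by_cases h32 : pvIdx hd.2 3 == 2
        · have e3 : pvIdx hd.2 3 = 2 := by simpa using h32
          simp [h2, e3, ih]
        · by_cases h33 : pvIdx hd.2 3 == 3
          · have e3 : pvIdx hd.2 3 = 3 := by simpa using h33
            simp [h2, e3, ih]
          · simp [h2, h31, h32, h33, ih]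

-- ===== VERDICT (by name: the statement is the Claim_ definition above) =====
theorem get_object_type_count_spec : Claim_equal_get_object_type_count := by
  intro ts _ _
  unfold Spec_get_object_type_count get_object_type_count get_object_type_count_alt
  rw [foldA_eq]
  simp
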